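-- pv_equiv track=rewrite | github.com/hemanthshinoda2-dotcom/Tankoban-Max | experiments/comicbookreplacer_qt/page_layout.py | two_page_extra_slots_before
-- ===== SOURCE A (Python) =====
-- def two_page_extra_slots_before(idx: int, spread_set: set[int] | None = None) -> int:
--     if idx <= 1:
--         return 0
--     spreads = spread_set or set()
--     extra = 0
--     for i in range(1, int(idx)):
--         if i in spreads:
--             extra += 1
--     return extra
-- ===== SOURCE B (Python) =====
-- def two_page_extra_slots_before(idx: int, spread_set: set[int] | None = None) -> int:
--     spreads = spread_set if spread_set is not None else set()
--     return sum(1 for p in spreads if 1 <= p < idx)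
-- ===== Notes on version B (the rewrite author's own statement) =====
-- stated objective: alternative
-- what changed: B iterates over the spread set counting members in [1, idx) instead of scanning every index in range(1, idx) and testing set membership; it does O(|spread_set|) work instead of O(idx) iterations, at similar measured cost on the generated inputs.
import Mathlib
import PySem

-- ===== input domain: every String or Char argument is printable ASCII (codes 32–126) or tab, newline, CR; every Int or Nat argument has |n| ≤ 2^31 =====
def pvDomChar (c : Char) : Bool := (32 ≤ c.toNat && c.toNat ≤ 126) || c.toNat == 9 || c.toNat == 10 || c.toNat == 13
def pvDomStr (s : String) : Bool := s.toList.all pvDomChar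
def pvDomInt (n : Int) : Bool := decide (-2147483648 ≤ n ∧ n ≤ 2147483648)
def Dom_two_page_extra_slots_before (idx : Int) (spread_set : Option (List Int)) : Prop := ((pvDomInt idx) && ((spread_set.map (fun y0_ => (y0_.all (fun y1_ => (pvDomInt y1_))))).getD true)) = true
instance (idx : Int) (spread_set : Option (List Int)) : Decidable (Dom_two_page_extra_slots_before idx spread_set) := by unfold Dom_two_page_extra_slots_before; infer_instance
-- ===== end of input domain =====

-- B counts the members of the spread set lying in [1, idx) instead of scanning range(1, idx).

-- ===== PORT A =====
-- 'spread_set or set()': None and the empty set are falsy and both yield set()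
def pyOrEmptySet (spread_set : Option (List Int)) : PySem.Set Int :=
  match spread_set with
  | none => PySem.Set.empty
  | some xs => if PySem.Set.ofList xs = PySem.Set.empty then PySem.Set.empty else PySem.Set.ofList xs

def two_page_extra_slots_before (idx : Int) (spread_set : Option (List Int)) : Int :=
  if idx ≤ 1 then 0
  else
    let spreads : PySem.Set Int := pyOrEmptySet spread_set
    (PySem.List.pyRange 1 idx 1).foldl
      (fun extra i => if PySem.Set.contains spreads i then extra + 1 else extra) 0

-- ===== PORT B =====
-- spread_set if spread_set is not None else set()
def setOfOpt (spread_set : Option (List Int)) : PySem.Set Int :=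
  match spread_set with
  | none => PySem.Set.empty
  | some xs => PySem.Set.ofList xs

def two_page_extra_slots_before_alt (idx : Int) (spread_set : Option (List Int)) : Int :=
  let spreads : PySem.Set Int := setOfOpt spread_set
  -- sum(1 for p in spreads if 1 <= p < idx); order-independent consumption of the set
  ((spreads.filter (fun p => decide (1 ≤ p) && decide (p < idx))).length : Int)

-- ===== PRECONDITION & SPEC =====
def Spec_two_page_extra_slots_before (idx : Int) (spread_set : Option (List Int)) (out : Int) : Prop := out = two_page_extra_slots_before_alt idx spread_set
instance (idx : Int) (spread_set : Option (List Int)) (out : Int) : Decidable (Spec_two_page_extra_slots_before idx spread_set out) := by unfold Spec_two_page_extra_slots_before; infer_instance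

-- ===== CLAIM (what is proved, stated in full; the proofs are below) =====
def Claim_equal_two_page_extra_slots_before : Prop := ∀ (idx : Int) (spread_set : Option (List Int)), Dom_two_page_extra_slots_before idx spread_set → Spec_two_page_extra_slots_before idx spread_set (two_page_extra_slots_before idx spread_set)

-- ===== LEMMAS AND PROOFS =====

theorem pyOrEmptySet_eq (ss : Option (List Int)) : pyOrEmptySet ss = setOfOpt ss := by
  cases ss with
  | none => rfl
  | some xs =>
    show (if PySem.Set.ofList xs = PySem.Set.empty then PySem.Set.empty else PySem.Set.ofList xs)
        = PySem.Set.ofList xs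
    split
    · rename_i h; exact h.symm
    · rfl

theorem nodup_setOfOpt (ss : Option (List Int)) : (setOfOpt ss).Nodup := by
  cases ss with
  | none => exact List.nodup_nil
  | some xs => exact PySem.Set.nodup_ofList xs

-- the counting foldl is countP
theorem foldl_count_eq_countP (p : Int → Bool) (l : List Int) (acc : Int) :
    l.foldl (fun extra i => if p i then extra + 1 else extra) acc = acc + (l.countP p : Int) := by
  induction l generalizing acc with
  | nil => simp
  | cons x xs ih =>
    simp only [List.foldl_cons, List.countP_cons, ih]
    by_cases h : p x <;> simp [h] <;> try ring

-- counting members of a nodup set s inside the range = counting range elements inside s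
theorem countP_range_eq_filter_len (idx : Int) (s : List Int) (hs : s.Nodup) :
    ((PySem.List.pyRange 1 idx 1).countP (fun i => PySem.Set.contains s i) : Int)
      = ((s.filter (fun p => decide (1 ≤ p) && decide (p < idx))).length : Int) := by
  have h1 : List.Perm ((PySem.List.pyRange 1 idx 1).filter (fun i => PySem.Set.contains s i))
      (s.filter (fun p => decide (1 ≤ p) && decide (p < idx))) := by
    rw [List.perm_ext_iff_of_nodup
      ((PySem.List.nodup_pyRange_one 1 idx).filter _) (hs.filter _)]
    intro a
    simp [List.mem_filter, PySem.List.mem_pyRange_one, PySem.Set.contains]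
    tauto
  rw [List.countP_eq_length_filter, h1.length_eq]

-- ===== VERDICT (by name: the statement is the Claim_ definition above) =====
theorem two_page_extra_slots_before_spec : Claim_equal_two_page_extra_slots_before := by
  intro idx spread_set _
  unfold Spec_two_page_extra_slots_before two_page_extra_slots_before two_page_extra_slots_before_alt
  by_cases hle : idx ≤ 1
  · simp only [hle, if_true]
    have : (setOfOpt spread_set).filter (fun p => decide (1 ≤ p) && decide (p < idx)) = [] := by
      apply List.filter_eq_nil_iff.mpr
      intro a _
      simp only [Bool.and_eq_true, decide_eq_true_eq, not_and]
      intro h1; omega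
    simp [this]
  · simp only [hle, if_false, pyOrEmptySet_eq]
    rw [foldl_count_eq_countP,
      countP_range_eq_filter_len idx (setOfOpt spread_set) (nodup_setOfOpt spread_set)]
    simp
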